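-- pv_equiv track=rewrite | github.com/ErikBergman/price_watcher_for_ida | poc_pricerunner_price_history_json.py | compress_history_rows
-- ===== SOURCE A (Python) =====
-- def compress_history_rows(history: list[dict]) -> list[dict]:
--     if not history:
--         return []
--
--     newest_first = list(reversed(history))
--     rows: list[dict] = []
--     current_price = newest_first[0]["price"]
--
--     for index, point in enumerate(newest_first):
--         if point["price"] != current_price:
--             previous = dict(newest_first[index - 1])
--             previous["newPrice"] = point["price"]
--             rows.append(previous)
--             current_price = point["price"]
--
--     rows.append(dict(newest_first[-1]))
--     return rows
-- ===== SOURCE B (Python) =====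
-- def compress_history_rows(history: list[dict]) -> list[dict]:
--     if not history:
--         return []
--     newest_first = list(reversed(history))
--     # group newest_first into maximal runs of consecutive equal price
--     runs: list[list[dict]] = []
--     for point in newest_first:
--         if runs and runs[-1][-1]["price"] == point["price"]:
--             runs[-1].append(point)
--         else:
--             runs.append([point])
--     # one row per run boundary, plus the oldest point
--     rows: list[dict] = []
--     for run, nxt in zip(runs, runs[1:]):
--         row = dict(run[-1])
--         row["newPrice"] = nxt[0]["price"]
--         rows.append(row)
--     rows.append(dict(runs[-1][-1]))
--     return rows
-- ===== Notes on version B (the rewrite author's own statement) =====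
-- stated objective: alternative
-- what changed: Replaces the index/current_price state machine (with its newest_first[index-1] lookup) by an explicit two-phase pipeline: first group the reversed history into maximal runs of consecutive equal price, then emit one row per adjacent pair of runs plus the final element.
import Mathlib
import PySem

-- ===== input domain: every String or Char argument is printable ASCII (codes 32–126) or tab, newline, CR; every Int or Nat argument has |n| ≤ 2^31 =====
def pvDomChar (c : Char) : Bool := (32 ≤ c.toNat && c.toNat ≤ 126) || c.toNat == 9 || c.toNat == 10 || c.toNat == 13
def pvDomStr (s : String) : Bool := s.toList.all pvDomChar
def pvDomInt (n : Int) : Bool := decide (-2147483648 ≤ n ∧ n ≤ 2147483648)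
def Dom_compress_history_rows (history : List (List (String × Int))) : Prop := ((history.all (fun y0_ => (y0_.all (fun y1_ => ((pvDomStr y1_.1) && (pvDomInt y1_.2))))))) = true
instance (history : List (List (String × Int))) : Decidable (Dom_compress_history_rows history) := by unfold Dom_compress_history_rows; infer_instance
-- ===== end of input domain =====

-- B: instead of A's index/current_price state machine, group the reversed history
-- into maximal runs of consecutive equal price and emit one row per adjacent run
-- pair plus the final element (alternative decomposition, same return value).

-- shared helpers: a row is a dict (assoc list); d["price"] and the newPrice update
def pvPrice (d : List (String × Int)) : Int := (PySem.Dict.mk d).getD "price" 0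

def pvSetNew (d : List (String × Int)) (v : Int) : List (String × Int) :=
  ((PySem.Dict.mk d).insert "newPrice" v).items

-- ===== PORT A =====
-- the 'for index, point in enumerate(newest_first)' loop, state (rows, current_price, index)
def pvALoop (ns : List (List (String × Int))) (rows : List (List (String × Int)))
    (current : Int) (index : Nat) : List (List (String × Int)) → List (List (String × Int))
  | [] => rows
  | point :: rest =>
    if pvPrice point ≠ current then
      let previous := (PySem.List.pyGet? ns ((index : Int) - 1)).getD []
      pvALoop ns (rows ++ [pvSetNew previous (pvPrice point)]) (pvPrice point) (index + 1) rest
    else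
      pvALoop ns rows current (index + 1) rest

def compress_history_rows (history : List (List (String × Int))) : List (List (String × Int)) :=
  if history = [] then []
  else
    let newest_first := history.reverse
    let current_price := pvPrice ((PySem.List.pyGet? newest_first 0).getD [])
    let rows := pvALoop newest_first [] current_price 0 newest_first
    rows ++ [(PySem.List.pyGet? newest_first (-1)).getD []]

-- ===== PORT B =====
-- the run-building loop body: 'if runs and runs[-1][-1]["price"] == point["price"]: …'
def pvPushRun (runs : List (List (List (String × Int)))) (point : List (String × Int)) :
    List (List (List (String × Int))) :=
  match runs.getLast? with
  | some r =>
    if pvPrice ((PySem.List.pyGet? r (-1)).getD []) == pvPrice point then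
      runs.dropLast ++ [r ++ [point]]
    else
      runs ++ [[point]]
  | none => runs ++ [[point]]

def compress_history_rows_alt (history : List (List (String × Int))) : List (List (String × Int)) :=
  if history = [] then []
  else
    let newest_first := history.reverse
    let runs := newest_first.foldl pvPushRun []
    let rows := (runs.zip (PySem.List.slice runs (some 1) none)).map (fun rn =>
      pvSetNew ((PySem.List.pyGet? rn.1 (-1)).getD [])
               (pvPrice ((PySem.List.pyGet? rn.2 0).getD [])))
    rows ++ [(PySem.List.pyGet? ((PySem.List.pyGet? runs (-1)).getD []) (-1)).getD []]

-- ===== PRECONDITION & SPEC =====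
-- Pre_ excludes exactly the inputs where A raises KeyError: a history entry without a "price" key.
def Pre_compress_history_rows (history : List (List (String × Int))) : Prop :=
  (history.all (fun d => (PySem.Dict.mk d).contains "price")) = true

instance (history : List (List (String × Int))) : Decidable (Pre_compress_history_rows history) := by
  unfold Pre_compress_history_rows; infer_instance

def pvWitness_compress_history_rows : (List (List (String × Int))) :=
  [[("price", 10)], [("price", 10)], [("price", 7)]]

def Spec_compress_history_rows (history : List (List (String × Int))) (out : List (List (String × Int))) : Prop := out = compress_history_rows_alt history
instance (history : List (List (String × Int))) (out : List (List (String × Int))) : Decidable (Spec_compress_history_rows history out) := by unfold Spec_compress_history_rows; infer_instance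

-- ===== CLAIM (what is proved, stated in full; the proofs are below) =====
def Claim_equal_compress_history_rows : Prop := ∀ (history : List (List (String × Int))), Dom_compress_history_rows history → Pre_compress_history_rows history → Spec_compress_history_rows history (compress_history_rows history)

-- ===== LEMMAS AND PROOFS =====

-- reference form: one row per adjacent price change, previous element carried explicitly
def pvGo (prev : List (String × Int)) : List (List (String × Int)) → List (List (String × Int))
  | [] => []
  | p :: rest =>
    if pvPrice p ≠ pvPrice prev then pvSetNew prev (pvPrice p) :: pvGo p rest
    else pvGo p rest

-- reference run builder: current open run carried explicitly
def pvConsume (r : List (List (String × Int))) :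
    List (List (String × Int)) → List (List (List (String × Int)))
  | [] => [r]
  | p :: pts =>
    if pvPrice ((PySem.List.pyGet? r (-1)).getD []) == pvPrice p then pvConsume (r ++ [p]) pts
    else r :: pvConsume [p] pts

-- reference emitter over the run list
def pvEmit : List (List (List (String × Int))) → List (List (String × Int))
  | [] => []
  | [r] => [(PySem.List.pyGet? r (-1)).getD []]
  | r :: r' :: rs =>
    pvSetNew ((PySem.List.pyGet? r (-1)).getD []) (pvPrice ((PySem.List.pyGet? r' 0).getD []))
      :: pvEmit (r' :: rs)

lemma pvALoop_eq (pts : List (List (String × Int))) :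
    ∀ (ns rows : _) (index : Nat) (prev : List (String × Int)),
      PySem.List.pyGet? ns ((index : Int) - 1) = some prev → ns.drop index = pts →
      pvALoop ns rows (pvPrice prev) index pts = rows ++ pvGo prev pts := by
  induction pts with
  | nil => intro ns rows index prev _ _; simp [pvALoop, pvGo]
  | cons p pts ih =>
    intro ns rows index prev hget hdrop
    have hp : ns[index]? = some p := by
      have h2 : (List.drop index ns)[0]? = ns[index + 0]? := List.getElem?_drop
      rw [hdrop] at h2; simpa using h2.symm
    have hnext : PySem.List.pyGet? ns (((index + 1 : Nat) : Int) - 1) = some p := by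
      have : (((index + 1 : Nat) : Int) - 1) = ((index : Nat) : Int) := by push_cast; ring
      rw [this, PySem.List.pyGet?_natCast, hp]
    have hdrop' : ns.drop (index + 1) = pts := by
      have : ns.drop (index + 1) = (ns.drop index).drop 1 := by
        rw [List.drop_drop]
      simp [this, hdrop]
    by_cases hc : pvPrice p ≠ pvPrice prev
    · rw [pvALoop, if_pos hc, hget]
      rw [ih ns _ (index + 1) p hnext hdrop']
      simp [pvGo, hc]
    · rw [pvALoop, if_neg hc]
      have hceq : pvPrice p = pvPrice prev := not_ne_iff.mp hc
      rw [show pvPrice prev = pvPrice p from hceq.symm]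
      rw [ih ns rows (index + 1) p hnext hdrop']
      rw [pvGo, if_neg hc]

lemma pvConsume_ne_nil (pts : List (List (String × Int))) :
    ∀ r, pvConsume r pts ≠ [] := by
  induction pts with
  | nil => intro r; simp [pvConsume]
  | cons p pts ih =>
    intro r; rw [pvConsume]; split
    · exact ih _
    · simp

lemma pvConsume_head (pts : List (List (String × Int))) :
    ∀ (h : List (String × Int)) (t : List (List (String × Int))),
      ∃ tl rs, pvConsume (h :: t) pts = (h :: tl) :: rs := by
  induction pts with
  | nil => intro h t; exact ⟨t, [], rfl⟩
  | cons p pts ih =>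
    intro h t; rw [pvConsume]; split
    · simpa using ih h (t ++ [p])
    · exact ⟨t, pvConsume [p] pts, rfl⟩

lemma pvFoldl_pushRun (pts : List (List (String × Int))) :
    ∀ (rs : List (List (List (String × Int)))) (r : List (List (String × Int))), r ≠ [] →
      List.foldl pvPushRun (rs ++ [r]) pts = rs ++ pvConsume r pts := by
  induction pts with
  | nil => intro rs r _; simp [pvConsume]
  | cons p pts ih =>
    intro rs r hr
    rw [List.foldl_cons, pvConsume]
    have hlast : (rs ++ [r]).getLast? = some r := by simp
    have hstep : pvPushRun (rs ++ [r]) p =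
        if pvPrice ((PySem.List.pyGet? r (-1)).getD []) == pvPrice p then rs ++ [r ++ [p]]
        else (rs ++ [r]) ++ [[p]] := by
      simp only [pvPushRun, hlast]
      split <;> simp
    rw [hstep]
    by_cases hc : (pvPrice ((PySem.List.pyGet? r (-1)).getD []) == pvPrice p) = true
    · rw [if_pos hc, if_pos hc, ih rs (r ++ [p]) (by simp)]
    · rw [if_neg hc, if_neg hc, ih (rs ++ [r]) [p] (by simp)]
      simp

lemma pvZip_emit (runs : List (List (List (String × Int)))) (h : runs ≠ []) :
    (runs.zip (PySem.List.slice runs (some 1) none)).map (fun rn =>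
        pvSetNew ((PySem.List.pyGet? rn.1 (-1)).getD [])
                 (pvPrice ((PySem.List.pyGet? rn.2 0).getD [])))
      ++ [(PySem.List.pyGet? ((PySem.List.pyGet? runs (-1)).getD []) (-1)).getD []]
    = pvEmit runs := by
  induction runs with
  | nil => simp at h
  | cons r runs ih =>
    cases runs with
    | nil => simp [pvEmit, PySem.List.slice_from_one, PySem.List.pyGet?_neg_one]
    | cons r' rs =>
      have ih' := ih (by simp)
      rw [PySem.List.slice_from_one] at ih' ⊢
      simp only [List.tail_cons] at ih' ⊢
      rw [pvEmit]
      rw [show (r :: r' :: rs).zip (r' :: rs) = (r, r') :: (r' :: rs).zip rs from rfl]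
      rw [List.map_cons]
      have hlast : PySem.List.pyGet? (r :: r' :: rs) (-1) = PySem.List.pyGet? (r' :: rs) (-1) := by
        rw [PySem.List.pyGet?_neg_one, PySem.List.pyGet?_neg_one, List.getLast?_cons_cons]
      rw [hlast, List.cons_append, ih']

lemma pvConsume_emit (pts : List (List (String × Int))) :
    ∀ (r : List (List (String × Int))) (prev : List (String × Int)),
      r.getLast? = some prev →
      pvEmit (pvConsume r pts) = pvGo prev pts ++ [pts.getLastD prev] := by
  induction pts with
  | nil =>
    intro r prev hlast
    simp [pvConsume, pvEmit, PySem.List.pyGet?_neg_one, hlast, pvGo]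
  | cons p pts ih =>
    intro r prev hlast
    have hprev : (PySem.List.pyGet? r (-1)).getD [] = prev := by
      rw [PySem.List.pyGet?_neg_one, hlast]; rfl
    rw [pvConsume, hprev]
    by_cases hc : pvPrice prev == pvPrice p
    · rw [if_pos hc]
      have heq : pvPrice prev = pvPrice p := by exact beq_iff_eq.mp hc
      rw [ih (r ++ [p]) p (by simp)]
      rw [pvGo, if_neg (by simp [heq]), List.getLastD_cons]
    · rw [if_neg hc]
      have hne : pvPrice p ≠ pvPrice prev := by
        intro h; exact hc (beq_iff_eq.mpr h.symm)
      obtain ⟨tl, rs, hco⟩ := pvConsume_head pts p []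
      have ihp := ih [p] p rfl
      rw [hco] at ihp ⊢
      rw [pvEmit]
      rw [PySem.List.pyGet?_zero_cons]
      rw [show (PySem.List.pyGet? r (-1)).getD [] = prev from hprev]
      rw [ihp, pvGo, if_pos hne, List.getLastD_cons]
      simp

-- A in reference form
lemma pvA_char (h0 : List (String × Int)) (t : List (List (String × Int)))
    (history : List (List (String × Int))) (hne : history ≠ [])
    (hrev : history.reverse = h0 :: t) :
    compress_history_rows history = pvGo h0 t ++ [t.getLastD h0] := by
  rw [compress_history_rows, if_neg hne]
  simp only [hrev]
  have h0get : pvPrice ((PySem.List.pyGet? (h0 :: t) 0).getD []) = pvPrice h0 := by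
    rw [PySem.List.pyGet?_zero_cons]; rfl
  rw [h0get]
  have hstep : pvALoop (h0 :: t) [] (pvPrice h0) 0 (h0 :: t)
      = pvALoop (h0 :: t) [] (pvPrice h0) 1 t := by
    rw [pvALoop, if_neg (by simp)]
  rw [hstep]
  rw [pvALoop_eq t (h0 :: t) [] 1 h0 (by simp) (by simp)]
  rw [PySem.List.pyGet?_neg_one]
  simp [List.getLast?_cons]

-- B in reference form
lemma pvB_char (h0 : List (String × Int)) (t : List (List (String × Int)))
    (history : List (List (String × Int))) (hne : history ≠ [])
    (hrev : history.reverse = h0 :: t) :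
    compress_history_rows_alt history = pvGo h0 t ++ [t.getLastD h0] := by
  rw [compress_history_rows_alt, if_neg hne]
  simp only [hrev]
  have hruns : (h0 :: t).foldl pvPushRun [] = pvConsume [h0] t := by
    rw [List.foldl_cons]
    have h1 : pvPushRun [] h0 = [[h0]] := by rw [pvPushRun]; rfl
    rw [h1]
    have := pvFoldl_pushRun t [] [h0] (by simp)
    simpa using this
  rw [hruns]
  rw [pvZip_emit _ (pvConsume_ne_nil t [h0])]
  exact pvConsume_emit t [h0] h0 rfl

-- ===== VERDICT (by name: the statement is the Claim_ definition above) =====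
theorem compress_history_rows_spec : Claim_equal_compress_history_rows := by
  intro history _ _
  unfold Spec_compress_history_rows
  by_cases hne : history = []
  · subst hne; rfl
  · have hrevne : history.reverse ≠ [] := by simpa using hne
    obtain ⟨h0, t, hrev⟩ : ∃ h0 t, history.reverse = h0 :: t := by
      cases hr : history.reverse with
      | nil => exact absurd hr hrevne
      | cons a l => exact ⟨a, l, rfl⟩
    rw [pvA_char h0 t history hne hrev, pvB_char h0 t history hne hrev]
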